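-- pv_equiv track=rewrite | github.com/bgxc123/CSC-401-Winter-2021 | Midterm/midterm.py | piggyBank
-- ===== SOURCE A (Python) =====
-- def piggyBank(lst):
--     coinsum = 0
--     for i in lst:
--         if i == 'Q':
--             coinsum += 25
--         elif i == 'D':
--             coinsum +=10
--         elif i == 'N':
--             coinsum +=5
--         elif i == 'P':
--             coinsum +=1
--         else:
--             coinsum += 0
--     return coinsum
-- ===== SOURCE B (Python) =====
-- def piggyBank(lst):
--     return 25 * lst.count('Q') + 10 * lst.count('D') + 5 * lst.count('N') + lst.count('P')
-- ===== Notes on version B (the rewrite author's own statement) =====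
-- stated objective: alternative
-- what changed: Replaces the single accumulating loop with a branch per element by per-coin counting: 25*count('Q') + 10*count('D') + 5*count('N') + count('P').
import Mathlib
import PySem

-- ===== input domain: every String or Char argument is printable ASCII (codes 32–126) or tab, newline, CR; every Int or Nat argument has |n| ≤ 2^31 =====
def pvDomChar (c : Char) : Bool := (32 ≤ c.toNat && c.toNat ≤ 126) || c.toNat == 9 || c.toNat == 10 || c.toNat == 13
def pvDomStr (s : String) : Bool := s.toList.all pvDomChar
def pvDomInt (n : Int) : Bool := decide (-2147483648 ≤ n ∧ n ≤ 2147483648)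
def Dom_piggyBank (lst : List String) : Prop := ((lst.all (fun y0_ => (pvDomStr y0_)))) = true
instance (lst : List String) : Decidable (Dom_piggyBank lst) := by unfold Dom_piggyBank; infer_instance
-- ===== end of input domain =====

-- B computes the same sum via four per-coin counts instead of one accumulating loop (objective: alternative decomposition).

-- ===== PORT A =====
def piggyBank (lst : List String) : Int :=
  lst.foldl (fun coinsum i =>
    if i == "Q" then coinsum + 25
    else if i == "D" then coinsum + 10
    else if i == "N" then coinsum + 5
    else if i == "P" then coinsum + 1
    else coinsum + 0) 0

-- ===== PORT B =====
def piggyBank_alt (lst : List String) : Int :=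
  25 * PySem.List.count lst "Q" + 10 * PySem.List.count lst "D"
    + 5 * PySem.List.count lst "N" + PySem.List.count lst "P"

-- ===== PRECONDITION & SPEC =====
def Spec_piggyBank (lst : List String) (out : Int) : Prop := out = piggyBank_alt lst
instance (lst : List String) (out : Int) : Decidable (Spec_piggyBank lst out) := by unfold Spec_piggyBank; infer_instance

-- ===== CLAIM (what is proved, stated in full; the proofs are below) =====
def Claim_equal_piggyBank : Prop := ∀ (lst : List String), Dom_piggyBank lst → Spec_piggyBank lst (piggyBank lst)

-- ===== LEMMAS AND PROOFS =====
theorem piggyBank_fold_acc (l : List String) (c : Int) :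
    (l.foldl (fun coinsum i =>
      if i == "Q" then coinsum + 25
      else if i == "D" then coinsum + 10
      else if i == "N" then coinsum + 5
      else if i == "P" then coinsum + 1
      else coinsum + 0) c)
    = c + 25 * PySem.List.count l "Q" + 10 * PySem.List.count l "D"
        + 5 * PySem.List.count l "N" + PySem.List.count l "P" := by
  induction l generalizing c with
  | nil => simp [PySem.List.count]
  | cons h t ih =>
    simp only [List.foldl_cons]
    rw [ih]
    simp only [PySem.List.count, List.count_cons]
    split_ifs <;> simp_all [beq_iff_eq] <;> ring

theorem piggyBank_eq_alt (lst : List String) : piggyBank lst = piggyBank_alt lst := by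
  rw [piggyBank, piggyBank_alt, piggyBank_fold_acc]; ring

-- ===== VERDICT (by name: the statement is the Claim_ definition above) =====
theorem piggyBank_spec : Claim_equal_piggyBank := by
  intro lst _
  exact piggyBank_eq_alt lst
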